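-- pv_equiv track=rewrite | github.com/OddosIncHQ/oulalab | addons/l10n_cl_hr/report/amount_to_text_es.py | _convert_nn
-- ===== SOURCE A (Python) =====
-- units_29 = (
--     'CERO', 'UN', 'DOS', 'TRES', 'CUATRO', 'CINCO', 'SEIS',
--     'SIETE', 'OCHO', 'NUEVE', 'DIEZ', 'ONCE', 'DOCE',
--     'TRECE', 'CATORCE', 'QUINCE', 'DIECISÉIS', 'DIECISIETE', 'DIECIOCHO',
--     'DIECINUEVE', 'VEINTE', 'VEINTIÚN', 'VEINTIDÓS', 'VEINTITRÉS', 'VEINTICUATRO',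
--     'VEINTICINCO', 'VEINTISÉIS', 'VEINTISIETE', 'VEINTIOCHO', 'VEINTINUEVE'
-- )
--
-- tens = (
--     'TREINTA', 'CUARENTA', 'CINCUENTA', 'SESENTA', 'SETENTA', 'OCHENTA', 'NOVENTA', 'CIEN'
-- )
--
-- def _convert_nn(val):
--     """ Convierte valores menores a 100 a texto """
--     if val < 30:
--         return units_29[val]
--     for (dcap, dval) in ((k, 30 + (10 * v)) for (v, k) in enumerate(tens)):
--         if dval + 10 > val:
--             if val % 10:
--                 return dcap + ' Y ' + units_29[val % 10]
--             return dcap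
-- ===== SOURCE B (Python) =====
-- units_29 = (
--     'CERO', 'UN', 'DOS', 'TRES', 'CUATRO', 'CINCO', 'SEIS',
--     'SIETE', 'OCHO', 'NUEVE', 'DIEZ', 'ONCE', 'DOCE',
--     'TRECE', 'CATORCE', 'QUINCE', 'DIECISÉIS', 'DIECISIETE', 'DIECIOCHO',
--     'DIECINUEVE', 'VEINTE', 'VEINTIÚN', 'VEINTIDÓS', 'VEINTITRÉS', 'VEINTICUATRO',
--     'VEINTICINCO', 'VEINTISÉIS', 'VEINTISIETE', 'VEINTIOCHO', 'VEINTINUEVE'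
-- )
--
-- tens = (
--     'TREINTA', 'CUARENTA', 'CINCUENTA', 'SESENTA', 'SETENTA', 'OCHENTA', 'NOVENTA', 'CIEN'
-- )
--
-- def _convert_nn(val):
--     """ Convierte valores menores a 100 a texto """
--     if val < 30:
--         return units_29[val]
--     idx = (val - 30) // 10
--     if idx < len(tens):
--         dcap = tens[idx]
--         r = val % 10
--         return dcap + ' Y ' + units_29[r] if r else dcap
-- ===== Notes on version B (the rewrite author's own statement) =====
-- stated objective: simpler
-- what changed: B replaces A's generator-driven scan over enumerate(tens) with a direct arithmetic bucket lookup tens[(val - 30) // 10], guarded so val >= 110 still falls through to None like A.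
import Mathlib
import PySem

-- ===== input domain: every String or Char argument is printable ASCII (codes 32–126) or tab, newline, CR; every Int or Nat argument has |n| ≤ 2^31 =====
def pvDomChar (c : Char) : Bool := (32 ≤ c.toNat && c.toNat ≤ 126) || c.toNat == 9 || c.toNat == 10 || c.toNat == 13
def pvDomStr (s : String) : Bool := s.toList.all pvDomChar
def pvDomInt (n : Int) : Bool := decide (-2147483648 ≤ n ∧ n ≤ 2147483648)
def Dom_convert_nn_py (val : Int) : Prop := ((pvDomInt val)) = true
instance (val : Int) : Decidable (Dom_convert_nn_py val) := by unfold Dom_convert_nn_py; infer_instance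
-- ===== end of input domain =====

-- B replaces A's enumerate-scan over the tens tuple with a direct arithmetic bucket
-- lookup (val - 30) // 10 (objective: simpler). Equal return values proved on Pre_.

-- ===== PORT A =====
def pvUnits29 : List String :=
  ["CERO", "UN", "DOS", "TRES", "CUATRO", "CINCO", "SEIS",
   "SIETE", "OCHO", "NUEVE", "DIEZ", "ONCE", "DOCE",
   "TRECE", "CATORCE", "QUINCE", "DIECISÉIS", "DIECISIETE", "DIECIOCHO",
   "DIECINUEVE", "VEINTE", "VEINTIÚN", "VEINTIDÓS", "VEINTITRÉS", "VEINTICUATRO",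
   "VEINTICINCO", "VEINTISÉIS", "VEINTISIETE", "VEINTIOCHO", "VEINTINUEVE"]

def pvTens : List String :=
  ["TREINTA", "CUARENTA", "CINCUENTA", "SESENTA", "SETENTA", "OCHENTA", "NOVENTA", "CIEN"]

-- A's for-loop over enumerate(tens); "" stands for the Python None of an exhausted
-- loop (outside Pre_).
def convert_nn_loop (val : Int) : List (Int × String) → String
  | [] => ""
  | (v, dcap) :: rest =>
      let dval : Int := 30 + 10 * v
      if dval + 10 > val then
        if PySem.Int.mod val 10 ≠ 0 then
          dcap ++ " Y " ++ ((PySem.List.pyGet? pvUnits29 (PySem.Int.mod val 10)).getD "")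
        else dcap
      else convert_nn_loop val rest

def convert_nn_py (val : Int) : String :=
  if val < 30 then (PySem.List.pyGet? pvUnits29 val).getD ""
  else convert_nn_loop val (PySem.List.enumerate pvTens)

-- ===== PORT B =====
-- "" stands for Python's None fall-through when idx ≥ len(tens) (outside Pre_).
def convert_nn_py_alt (val : Int) : String :=
  if val < 30 then (PySem.List.pyGet? pvUnits29 val).getD ""
  else
    let idx := PySem.Int.floordiv (val - 30) 10
    if idx < (pvTens.length : Int) then
      let dcap := (PySem.List.pyGet? pvTens idx).getD ""
      let r := PySem.Int.mod val 10
      if r ≠ 0 then dcap ++ " Y " ++ ((PySem.List.pyGet? pvUnits29 r).getD "") else dcap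
    else ""

-- ===== PRECONDITION & SPEC =====
-- Exactly where the Python A returns a string: below -30 it raises IndexError, and at
-- 110 and above the loop exhausts and it returns None (not a value of the type).
def Pre_convert_nn_py (val : Int) : Prop := -30 ≤ val ∧ val < 110
instance (val : Int) : Decidable (Pre_convert_nn_py val) := by unfold Pre_convert_nn_py; infer_instance
def pvWitness_convert_nn_py : Int := (42)

def Spec_convert_nn_py (val : Int) (out : String) : Prop := out = convert_nn_py_alt val
instance (val : Int) (out : String) : Decidable (Spec_convert_nn_py val out) := by unfold Spec_convert_nn_py; infer_instance

-- ===== CLAIM (what is proved, stated in full; the proofs are below) =====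
def Claim_equal_convert_nn_py : Prop := ∀ (val : Int), Dom_convert_nn_py val → Pre_convert_nn_py val → Spec_convert_nn_py val (convert_nn_py val)

-- ===== LEMMAS AND PROOFS =====

-- ===== VERDICT (by name: the statement is the Claim_ definition above) =====
theorem convert_nn_py_spec : Claim_equal_convert_nn_py := by
  intro val _ hpre
  unfold Spec_convert_nn_py
  obtain ⟨h1, h2⟩ := hpre
  interval_cases val <;> decide
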